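-- pv_equiv track=rewrite | github.com/caleberi/leetcody | python/equal_bits.py | equal_bits
-- ===== SOURCE A (Python) =====
-- def equal_bits(bits_sequence):
--     if len(bits_sequence)<=1:
--         return 0
--     if len(bits_sequence)==2:
--         if ((bits_sequence[0] == 1 and bits_sequence[1]==0) or
--                  (bits_sequence[1]==0 and bits_sequence[0]==1)):
--             return 2
--         return 0
--     max_len  = 0
--     i=0
--     while i<len(bits_sequence):
--         ones = 0
--         zeros= 0
--         j = i
--         while j  < len(bits_sequence):
--             if bits_sequence[j]==0:
--                 zeros+=1
--             if bits_sequence[j]==1: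
--                 ones+=1
--             j+=1
--         if zeros==ones:
--             max_len = max(max_len,zeros+ones)
--         i+=1
--
--     return max_len
-- ===== SOURCE B (Python) =====
-- def equal_bits(bits_sequence):
--     # Single pass: running zero/one counts of the current suffix, decremented
--     # from the totals; the earliest balanced suffix is the largest (counts are
--     # non-increasing), so we can return at the first balance.
--     zeros = bits_sequence.count(0)
--     ones = bits_sequence.count(1)
--     for b in bits_sequence:
--         if zeros == ones:
--             return zeros + ones
--         if b == 0:
--             zeros -= 1
--         elif b == 1:
--             ones -= 1
--     return 0
-- ===== Notes on version B (the rewrite author's own statement) =====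
-- stated objective: faster
-- what changed: Replaced the O(n^2) recount-every-suffix double loop by a single pass that keeps running suffix zero/one counts decremented from the totals and returns at the first balanced suffix (the longest, since counts are non-increasing); the redundant length-2 special case is dropped.
-- intended difference: On the single input [0, 1] A's length-2 branch returns 0 because its or-condition repeats (b0==1 and b1==0) twice instead of also testing (b0==0 and b1==1); B returns 2, the balanced-suffix length, which the general loop of A itself would return and is clearly intended. — e.g. on equal_bits([0, 1]): A returns 0, B returns 2
import Mathlib
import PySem

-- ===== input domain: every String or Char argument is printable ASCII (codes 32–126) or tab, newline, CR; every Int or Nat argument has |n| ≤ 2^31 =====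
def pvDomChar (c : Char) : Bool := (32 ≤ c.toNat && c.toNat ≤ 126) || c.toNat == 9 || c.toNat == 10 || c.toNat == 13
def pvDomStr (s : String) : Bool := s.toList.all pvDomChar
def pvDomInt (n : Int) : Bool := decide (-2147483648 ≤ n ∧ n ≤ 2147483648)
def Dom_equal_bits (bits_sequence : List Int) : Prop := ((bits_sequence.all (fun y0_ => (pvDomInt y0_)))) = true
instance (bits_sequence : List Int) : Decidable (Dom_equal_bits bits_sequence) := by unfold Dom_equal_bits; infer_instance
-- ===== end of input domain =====

-- B replaces A's O(n^2) recount-of-every-suffix by one pass over running suffix counts (objective: faster).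

-- ===== PORT A =====
-- inner while loop: counts zeros and ones of bits_sequence[i:]; all indices j read are in range,
-- so the pyGetD default 0 is never used
def pvCountZO (bits_sequence : List Int) (i : Int) : Int × Int :=
  (PySem.List.pyRange i (bits_sequence.length : Int) 1).foldl
    (fun zo j =>
      let b := PySem.List.pyGetD bits_sequence j 0
      let zo1 := if b = 0 then (zo.1 + 1, zo.2) else zo
      if b = 1 then (zo1.1, zo1.2 + 1) else zo1)
    (0, 0)

def equal_bits (bits_sequence : List Int) : Int :=
  if bits_sequence.length ≤ 1 then 0
  else if bits_sequence.length = 2 then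
    -- indices 0 and 1 are in range (length = 2), so pyGetD's default is never used
    if (PySem.List.pyGetD bits_sequence 0 0 = 1 ∧ PySem.List.pyGetD bits_sequence 1 0 = 0) ∨
       (PySem.List.pyGetD bits_sequence 1 0 = 0 ∧ PySem.List.pyGetD bits_sequence 0 0 = 1) then 2
    else 0
  else
    (PySem.List.pyRange 0 (bits_sequence.length : Int) 1).foldl
      (fun max_len i =>
        let zo := pvCountZO bits_sequence i
        if zo.1 = zo.2 then max max_len (zo.1 + zo.2) else max_len)
      0

-- ===== PORT B =====
-- the for loop of Source B: zeros/ones are the counts of the remaining suffix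
def pvLoopB : List Int → Int → Int → Int
  | [], _, _ => 0
  | b :: rest, zeros, ones =>
    if zeros = ones then zeros + ones
    else pvLoopB rest (if b = 0 then zeros - 1 else zeros)
                      (if b ≠ 0 ∧ b = 1 then ones - 1 else ones)

def equal_bits_alt (bits_sequence : List Int) : Int :=
  pvLoopB bits_sequence ((bits_sequence.count 0 : Nat) : Int) ((bits_sequence.count 1 : Nat) : Int)

-- ===== PRECONDITION & SPEC =====
-- On the single input [0, 1] A's length-2 branch returns 0 because its or-condition repeats
-- (b0==1 and b1==0) twice instead of also testing (b0==0 and b1==1); B returns 2, the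
-- balanced-suffix length, which A's own general loop would return and is clearly intended.
def D_equal_bits (bits_sequence : List Int) : Prop := bits_sequence = [0, 1]
instance (bits_sequence : List Int) : Decidable (D_equal_bits bits_sequence) := by unfold D_equal_bits; infer_instance
def Spec_equal_bits (bits_sequence : List Int) (out : Int) : Prop := ¬ D_equal_bits bits_sequence → out = equal_bits_alt bits_sequence
instance (bits_sequence : List Int) (out : Int) : Decidable (Spec_equal_bits bits_sequence out) := by unfold Spec_equal_bits; infer_instance
def pvDiffWitness_equal_bits : List Int := [0, 1]
def pvDiffWitnessOut_equal_bits : Int × Int := (0, 2)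

-- ===== CLAIM (what is proved, stated in full; the proofs are below) =====
def Claim_unchanged_equal_bits : Prop := ∀ (bits_sequence : List Int), Dom_equal_bits bits_sequence → Spec_equal_bits bits_sequence (equal_bits bits_sequence)
def Claim_changed_equal_bits : Prop := Dom_equal_bits (pvDiffWitness_equal_bits) ∧ D_equal_bits (pvDiffWitness_equal_bits) ∧ equal_bits (pvDiffWitness_equal_bits) = pvDiffWitnessOut_equal_bits.1 ∧ equal_bits_alt (pvDiffWitness_equal_bits) = pvDiffWitnessOut_equal_bits.2 ∧ pvDiffWitnessOut_equal_bits.1 ≠ pvDiffWitnessOut_equal_bits.2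
def Claim_exact_equal_bits : Prop := ∀ (bits_sequence : List Int), Dom_equal_bits bits_sequence → D_equal_bits bits_sequence → equal_bits bits_sequence ≠ equal_bits_alt bits_sequence

-- ===== LEMMAS AND PROOFS =====

-- the value both programs compute: the zero+one count of the longest suffix with equal counts
def pvSpecF : List Int → Int
  | [] => 0
  | b :: rest =>
    if ((b :: rest).count 0 : Int) = ((b :: rest).count 1 : Int)
    then ((b :: rest).count 0 : Int) + ((b :: rest).count 1 : Int)
    else pvSpecF rest

theorem pvSpecF_nonneg (l : List Int) : 0 ≤ pvSpecF l := by
  induction l with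
  | nil => simp [pvSpecF]
  | cons b rest ih => simp only [pvSpecF]; split <;> positivity

theorem pvSpecF_le (l : List Int) : pvSpecF l ≤ ((l.count 0 : Nat) : Int) + ((l.count 1 : Nat) : Int) := by
  induction l with
  | nil => simp [pvSpecF]
  | cons b rest ih =>
    simp only [pvSpecF]
    split
    · omega
    · refine ih.trans ?_
      simp [List.count_cons]
      split_ifs <;> omega

theorem pvLoopB_eq_spec (l : List Int) :
    pvLoopB l ((l.count 0 : Nat) : Int) ((l.count 1 : Nat) : Int) = pvSpecF l := by
  induction l with
  | nil => simp [pvLoopB, pvSpecF]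
  | cons b rest ih =>
    simp only [pvLoopB, pvSpecF]
    split
    · rfl
    · rw [← ih]
      congr 1
      · simp [List.count_cons]; split_ifs with h <;> simp_all
      · simp [List.count_cons]
        by_cases h0 : b = 0
        · simp [h0]
        · by_cases h1 : b = 1 <;> simp [h0, h1]

theorem pvAlt_eq_spec (l : List Int) : equal_bits_alt l = pvSpecF l := by
  simpa [equal_bits_alt] using pvLoopB_eq_spec l

-- inner count fold on a plain list
theorem pvCount_fold (l : List Int) (z o : Int) :
    l.foldl (fun zo b =>
      let zo1 := if b = 0 then (zo.1 + 1, zo.2) else zo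
      if b = 1 then (zo1.1, zo1.2 + 1) else zo1) (z, o)
    = (z + ((l.count 0 : Nat) : Int), o + ((l.count 1 : Nat) : Int)) := by
  induction l generalizing z o with
  | nil => simp
  | cons b rest ih =>
    simp only [List.foldl_cons, List.count_cons]
    by_cases h0 : b = 0
    · simp [h0, ih, Prod.ext_iff]; omega
    · by_cases h1 : b = 1
      · simp [h1, ih, Prod.ext_iff]; omega
      · simp [h0, h1, ih]

theorem pvCountZO_eq (l : List Int) (i : Int) (hi : 0 ≤ i) :
    pvCountZO l i = ((((l.drop i.toNat).count 0 : Nat) : Int), (((l.drop i.toNat).count 1 : Nat) : Int)) := by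
  unfold pvCountZO
  rw [PySem.List.foldl_pyRange_pyGetD' l 0
    (fun zo b =>
      let zo1 := if b = 0 then (zo.1 + 1, zo.2) else zo
      if b = 1 then (zo1.1, zo1.2 + 1) else zo1) ((0 : Int), (0 : Int)) hi,
    pvCount_fold]
  simp

theorem pvCountZO_nat (L : List Int) (k : Nat) :
    pvCountZO L ((0 : Int) + (k : Int))
    = ((((L.drop k).count 0 : Nat) : Int), (((L.drop k).count 1 : Nat) : Int)) := by
  rw [pvCountZO_eq _ _ (by positivity)]
  norm_num

theorem pvOuter (l : List Int) (m : Int) (hm : 0 ≤ m) :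
    (List.range l.length).foldl
      (fun acc k =>
        if (((l.drop k).count 0 : Nat) : Int) = (((l.drop k).count 1 : Nat) : Int)
        then max acc ((((l.drop k).count 0 : Nat) : Int) + (((l.drop k).count 1 : Nat) : Int))
        else acc) m
    = max m (pvSpecF l) := by
  induction l generalizing m with
  | nil => simp [pvSpecF]; omega
  | cons b rest ih =>
    rw [List.length_cons, List.range_succ_eq_map, List.foldl_cons, List.foldl_map]
    simp only [List.drop_zero, List.drop_succ_cons, Nat.succ_eq_add_one]
    by_cases hb : (((b :: rest).count 0 : Nat) : Int) = (((b :: rest).count 1 : Nat) : Int)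
    · rw [if_pos hb, ih _ (by omega)]
      have h1 := pvSpecF_le rest
      have h2 : (rest.count 0 : Int) ≤ ((b :: rest).count 0 : Nat) := by
        simp [List.count_cons]; split_ifs <;> omega
      have h3 : (rest.count 1 : Int) ≤ ((b :: rest).count 1 : Nat) := by
        simp [List.count_cons]; split_ifs <;> omega
      simp only [pvSpecF, if_pos hb]
      omega
    · rw [if_neg hb, ih _ hm]
      simp only [pvSpecF, if_neg hb]

theorem pvA_eq_spec (l : List Int) (hD : ¬ D_equal_bits l) : equal_bits l = pvSpecF l := by
  match l with
  | [] => simp [equal_bits, pvSpecF]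
  | [a] =>
    simp only [equal_bits, List.length_singleton]
    norm_num [pvSpecF, List.count_cons]
    by_cases h0 : a = 0 <;> by_cases h1 : a = 1 <;> simp [h0, h1]
  | [a, b] =>
    unfold D_equal_bits at hD
    simp only [equal_bits, PySem.List.pyGetD_ofNat']
    norm_num [pvSpecF, List.count_cons]
    by_cases h0 : a = 0 <;> by_cases h1 : a = 1 <;>
      by_cases h2 : b = 0 <;> by_cases h3 : b = 1 <;>
      simp_all
  | a :: b :: c :: rest =>
    simp only [equal_bits]
    rw [if_neg (by simp), if_neg (by simp)]
    rw [PySem.List.pyRange_one, List.foldl_map]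
    simp only [pvCountZO_nat]
    have hN : (((a :: b :: c :: rest).length : Int) - 0).toNat = (a :: b :: c :: rest).length := by omega
    rw [hN, pvOuter _ _ le_rfl]
    have := pvSpecF_nonneg (a :: b :: c :: rest)
    omega

-- ===== VERDICT (by name: the statement is the Claim_ definition above) =====
theorem equal_bits_spec : Claim_unchanged_equal_bits := by
  intro l _ hD
  rw [pvA_eq_spec l hD, pvAlt_eq_spec]

theorem equal_bits_changed : Claim_changed_equal_bits := by
  unfold Claim_changed_equal_bits; decide

theorem equal_bits_tight : Claim_exact_equal_bits := by
  intro l _ hD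
  unfold D_equal_bits at hD
  subst hD
  decide
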